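-- pv_equiv track=rewrite | github.com/pjpankowski/https-github.com-pjpankowski-Web-Inspector_1.1-STREAMLIT-Version-blob-main-wealth-crawler.py | msci-intelligence-v2.py | prioritize_links
-- ===== SOURCE A (Python) =====
-- def prioritize_links(links, priority_patterns):
--     """
--     Prioritize links based on URL patterns
--     Pages like /about, /capabilities, /solutions should be crawled first
--     """
--     priority_keywords = [
--         'about', 'capabilities', 'solutions', 'services', 'products',
--         'investment', 'approach', 'strategy', 'team', 'esg',
--         'sustainability', 'technology', 'platform'
--     ]
--
--     prioritized = []
--     normal = []
--
--     for link in links: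
--         link_lower = link.lower()
--         if any(keyword in link_lower for keyword in priority_keywords):
--             prioritized.append(link)
--         else:
--             normal.append(link)
--
--     return prioritized + normal
-- ===== SOURCE B (Python) =====
-- def prioritize_links(links, priority_patterns):
--     """
--     Prioritize links based on URL patterns
--     Pages like /about, /capabilities, /solutions should be crawled first
--     """
--     priority_keywords = [
--         'about', 'capabilities', 'solutions', 'services', 'products',
--         'investment', 'approach', 'strategy', 'team', 'esg',
--         'sustainability', 'technology', 'platform'
--     ]
--
--     def is_priority(link):
--         link_lower = link.lower()
--         return any(keyword in link_lower for keyword in priority_keywords)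
--
--     return sorted(links, key=lambda link: 0 if is_priority(link) else 1)
-- ===== Notes on version B (the rewrite author's own statement) =====
-- stated objective: idiomatic
-- what changed: Replaced the two-accumulator partition loop with a single stable sort by a binary key (0 for priority links, 1 otherwise), relying on sort stability to keep each group's original order.
import Mathlib
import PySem

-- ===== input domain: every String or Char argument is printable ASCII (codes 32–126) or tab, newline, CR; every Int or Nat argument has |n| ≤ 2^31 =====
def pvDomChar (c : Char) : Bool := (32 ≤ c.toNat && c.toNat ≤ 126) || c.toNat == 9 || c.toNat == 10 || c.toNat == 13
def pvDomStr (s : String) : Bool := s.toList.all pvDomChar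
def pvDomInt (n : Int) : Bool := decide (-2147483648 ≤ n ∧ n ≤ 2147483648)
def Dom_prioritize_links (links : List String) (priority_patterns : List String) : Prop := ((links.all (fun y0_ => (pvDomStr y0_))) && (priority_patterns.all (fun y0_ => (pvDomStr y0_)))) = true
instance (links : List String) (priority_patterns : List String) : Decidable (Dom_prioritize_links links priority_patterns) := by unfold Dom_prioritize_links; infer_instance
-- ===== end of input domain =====

-- B replaces A's two-accumulator partition loop by one stable sort on a binary key (idiomatic; same return value).


def pvKeywords : List String :=
  ["about", "capabilities", "solutions", "services", "products",
   "investment", "approach", "strategy", "team", "esg",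
   "sustainability", "technology", "platform"]

-- ===== PORT A =====
-- for link in links: append to prioritized or normal; return prioritized + normal
def prioritize_links (links : List String) (priority_patterns : List String) : List String :=
  let st := links.foldl (fun (acc : List String × List String) link =>
    let link_lower := PySem.Str.lower link
    if pvKeywords.any (fun keyword => PySem.Str.isIn keyword link_lower) then
      (acc.1 ++ [link], acc.2)
    else
      (acc.1, acc.2 ++ [link])) ([], [])
  st.1 ++ st.2

-- ===== PORT B =====
def pvIsPriority (link : String) : Bool :=
  let link_lower := PySem.Str.lower link
  pvKeywords.any (fun keyword => PySem.Str.isIn keyword link_lower)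

def prioritize_links_alt (links : List String) (priority_patterns : List String) : List String :=
  PySem.List.sorted links (fun link => if pvIsPriority link then (0 : Int) else 1) false

-- ===== PRECONDITION & SPEC =====
def Spec_prioritize_links (links : List String) (priority_patterns : List String) (out : List String) : Prop := out = prioritize_links_alt links priority_patterns
instance (links : List String) (priority_patterns : List String) (out : List String) : Decidable (Spec_prioritize_links links priority_patterns out) := by unfold Spec_prioritize_links; infer_instance

-- ===== CLAIM (what is proved, stated in full; the proofs are below) =====
def Claim_equal_prioritize_links : Prop := ∀ (links : List String) (priority_patterns : List String), Dom_prioritize_links links priority_patterns → Spec_prioritize_links links priority_patterns (prioritize_links links priority_patterns)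

-- ===== LEMMAS AND PROOFS =====

-- A's loop, with both accumulators generalized, yields filters.
theorem pvA_fold (links P N : List String) :
    links.foldl (fun (acc : List String × List String) link =>
      if pvKeywords.any (fun keyword => PySem.Str.isIn keyword (PySem.Str.lower link)) then
        (acc.1 ++ [link], acc.2)
      else (acc.1, acc.2 ++ [link])) (P, N)
    = (P ++ links.filter pvIsPriority, N ++ links.filter (fun l => !pvIsPriority l)) := by
  induction links generalizing P N with
  | nil => simp
  | cons x xs ih =>
    simp only [List.foldl_cons, List.filter_cons]
    by_cases h : pvIsPriority x = true
    · have h' : (pvKeywords.any (fun keyword => PySem.Str.isIn keyword (PySem.Str.lower x))) = true := h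
      simp only [h']
      rw [if_pos trivial, ih (P ++ [x]) N]
      simp [h]
    · have h' : (pvKeywords.any (fun keyword => PySem.Str.isIn keyword (PySem.Str.lower x))) = false := by
        simpa [pvIsPriority] using h
      simp only [h']
      rw [if_neg (by simp), ih P (N ++ [x])]
      simp [h]

-- One step of the stable insertion sort on a 0/1-keyed list keeps the "zeros then ones" shape.
theorem pvInsert_step (x : String) (P N : List String)
    (hP : ∀ y ∈ P, pvIsPriority y = true) (hN : ∀ y ∈ N, pvIsPriority y = false) :
    PySem.List.insertBy
      (fun a b => decide ((if pvIsPriority a then (0 : Int) else 1) < (if pvIsPriority b then (0 : Int) else 1)))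
      x (P ++ N)
    = if pvIsPriority x then (P ++ [x]) ++ N else P ++ (N ++ [x]) := by
  induction P with
  | nil =>
    induction N with
    | nil => simp [PySem.List.insertBy]
    | cons n ns ihn =>
      have hn : pvIsPriority n = false := hN n (by simp)
      by_cases hx : pvIsPriority x = true
      · simp [PySem.List.insertBy, hn, hx]
      · simp only [List.nil_append] at ihn ⊢
        simp [PySem.List.insertBy, hn, hx,
          ihn (fun y hy => hN y (by simp [hy]))]
  | cons p ps ihp =>
    have hp : pvIsPriority p = true := hP p (by simp)
    have hrec := ihp (fun y hy => hP y (by simp [hy]))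
    by_cases hx : pvIsPriority x = true
    · simp [PySem.List.insertBy, hp, hx] at hrec ⊢
      simp [hrec]
    · simp [PySem.List.insertBy, hp, hx] at hrec ⊢
      simp [hrec]

-- The whole sort of a 0/1-keyed list, run from a "zeros then ones" accumulator.
theorem pvSort_fold (links P N : List String)
    (hP : ∀ y ∈ P, pvIsPriority y = true) (hN : ∀ y ∈ N, pvIsPriority y = false) :
    links.foldl (fun acc x => PySem.List.insertBy
      (fun a b => decide ((if pvIsPriority a then (0 : Int) else 1) < (if pvIsPriority b then (0 : Int) else 1)))
      x acc) (P ++ N)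
    = (P ++ links.filter pvIsPriority) ++ (N ++ links.filter (fun l => !pvIsPriority l)) := by
  induction links generalizing P N with
  | nil => simp
  | cons x xs ih =>
    simp only [List.foldl_cons, List.filter_cons, pvInsert_step x P N hP hN]
    by_cases hx : pvIsPriority x = true
    · have hP' : ∀ y ∈ P ++ [x], pvIsPriority y = true := by
        intro y hy
        rcases List.mem_append.1 hy with h | h
        · exact hP y h
        · simp at h; subst h; exact hx
      rw [if_pos hx, ih (P ++ [x]) N hP' hN]
      simp [hx]
    · have hN' : ∀ y ∈ N ++ [x], pvIsPriority y = false := by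
        intro y hy
        rcases List.mem_append.1 hy with h | h
        · exact hN y h
        · simp at h; subst h; simpa using hx
      rw [if_neg hx, ih P (N ++ [x]) hP hN']
      simp [hx]

-- ===== VERDICT (by name: the statement is the Claim_ definition above) =====
theorem prioritize_links_spec : Claim_equal_prioritize_links := by
  intro links priority_patterns _
  show _ = _
  simp only [prioritize_links, prioritize_links_alt, PySem.List.sorted_eq_foldl_insertBy]
  rw [pvA_fold links [] []]
  have hB := pvSort_fold links [] [] (by simp) (by simp)
  simp only [List.nil_append] at hB
  rw [hB]
  simp
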